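-- pv_equiv track=rewrite | github.com/gist-ailab/assembly-kitting-manager | src/centermask_client.py | nine_to_3x3
-- ===== SOURCE A (Python) =====
-- def nine_to_3x3(nine):
--     itr = 0
--     for i in 0, 1, 2:
--         for j in 0, 1, 2:
--             if itr == nine:
--                 return i, j
--             else:
--                 itr += 1
-- ===== SOURCE B (Python) =====
-- def nine_to_3x3(nine):
--     if 0 <= nine < 9:
--         return divmod(nine, 3)
--     return None
-- ===== Notes on version B (the rewrite author's own statement) =====
-- stated objective: simpler
-- what changed: Replaces the nested 3x3 linear search with a constant-time closed form: a range check plus divmod(nine, 3).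
import Mathlib
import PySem

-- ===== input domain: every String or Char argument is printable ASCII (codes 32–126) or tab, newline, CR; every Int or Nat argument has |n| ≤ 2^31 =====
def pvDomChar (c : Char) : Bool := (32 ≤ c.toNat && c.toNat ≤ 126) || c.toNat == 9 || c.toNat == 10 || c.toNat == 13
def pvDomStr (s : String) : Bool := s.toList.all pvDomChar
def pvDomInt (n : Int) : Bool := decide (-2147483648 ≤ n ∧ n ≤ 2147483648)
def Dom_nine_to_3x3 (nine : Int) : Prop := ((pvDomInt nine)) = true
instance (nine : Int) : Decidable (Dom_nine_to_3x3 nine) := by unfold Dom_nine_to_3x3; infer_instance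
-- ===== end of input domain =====

-- B replaces A's nested 3x3 search with a range check plus divmod closed form (simpler).


-- ===== PORT A =====
-- Port of A: nested loop over i,j in {0,1,2} with a running counter itr, early return on itr == nine.
def nineA_inner (nine i itr : Int) (js : List Int) : Option (Int × Int) × Int :=
  match js with
  | [] => (none, itr)
  | j :: rest => if itr = nine then (some (i, j), itr) else nineA_inner nine i (itr + 1) rest

def nineA_outer (nine itr : Int) (is : List Int) : Option (Int × Int) :=
  match is with
  | [] => none
  | i :: rest =>
    match nineA_inner nine i itr [0, 1, 2] with
    | (some r, _) => some r
    | (none, itr') => nineA_outer nine itr' rest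

def nine_to_3x3 (nine : Int) : Option (Int × Int) :=
  nineA_outer nine 0 [0, 1, 2]

-- ===== PORT B =====
-- Port of B: range check + divmod closed form.
def nine_to_3x3_alt (nine : Int) : Option (Int × Int) :=
  if 0 ≤ nine ∧ nine < 9 then some (PySem.Int.floordiv nine 3, PySem.Int.mod nine 3) else none

-- ===== PRECONDITION & SPEC =====
def Spec_nine_to_3x3 (nine : Int) (out : Option (Int × Int)) : Prop := out = nine_to_3x3_alt nine
instance (nine : Int) (out : Option (Int × Int)) : Decidable (Spec_nine_to_3x3 nine out) := by unfold Spec_nine_to_3x3; infer_instance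

-- ===== CLAIM (what is proved, stated in full; the proofs are below) =====
def Claim_equal_nine_to_3x3 : Prop := ∀ (nine : Int), Dom_nine_to_3x3 nine → Spec_nine_to_3x3 nine (nine_to_3x3 nine)

-- ===== LEMMAS AND PROOFS =====

-- ===== VERDICT (by name: the statement is the Claim_ definition above) =====
theorem nine_to_3x3_spec : Claim_equal_nine_to_3x3 := by
  intro nine _
  unfold Spec_nine_to_3x3
  by_cases h : 0 ≤ nine ∧ nine < 9
  · obtain ⟨h0, h9⟩ := h
    interval_cases nine <;> decide
  · have e : ∀ k : Int, k ∈ ([0, 1, 2, 3, 4, 5, 6, 7, 8] : List Int) → ¬ k = nine := by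
      intro k hk
      fin_cases hk <;> omega
    simp only [nine_to_3x3, nine_to_3x3_alt, nineA_outer, nineA_inner, if_neg h]
    norm_num [e 0 (by norm_num), e 1 (by norm_num), e 2 (by norm_num), e 3 (by norm_num),
      e 4 (by norm_num), e 5 (by norm_num), e 6 (by norm_num), e 7 (by norm_num),
      e 8 (by norm_num)]
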